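-- pv_equiv track=rewrite | github.com/EthanRossmath/Number-Factorer | Classical_Factoring/one_shot_auxillaries/adding_factors.py | add_factor
-- ===== SOURCE A (Python) =====
-- import math
--
-- def refine(factors: list):
--     L = factors
--
--     while True:
--         pair = None
--         for i in range(len(L)):
--             for j in range(i + 1, len(L)):
--                 if math.gcd(L[i][0], L[j][0]) != 1:
--                     pair = (i, j)
--                     break
--             if pair:
--                 break
--         if not pair:
--             break
--
--         i, j = pair
--
--         d = math.gcd(L[i][0], L[j][0])
--         new1 = (L[i][0] // d, L[i][1])
--         new2 = (d, L[i][1]+L[j][1])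
--         new3 = (L[j][0] // d, L[j][1])
--         new_guys = [new1, new2, new3]
--
--         for idx in sorted([i, j], reverse=True):
--             del L[idx]
--
--         for newer in new_guys:
--             if newer[0] != 1:
--                 L.append(newer)
--
--     L.sort(key=lambda x: x[0])
--     return L
--
-- def add_factor(factor_list: list, new_factor: int):
--     """
--     factor_list = [(a_1, n_1), ..., (a_k, n_k)] is a factorization of a number N, i.e.
--     N = (a_1 ** n_1) * ... * (a_k ** n_k)
--     and new_factor is a divisor of N. Outputs a new refined list
--     """
--
--     new_list = []
--
--     for a in factor_list:
--         d = math.gcd(a[0], new_factor)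
--         if d == 1:
--             new_list.append(a)
--         elif a[0] // d == 1:
--             new_list.append((d, a[1]))
--         else:
--             new_list.extend([(a[0] // d, a[1]), (d, a[1])])
--
--     return refine(new_list)
-- ===== SOURCE B (Python) =====
-- import math
--
-- def _split_by(a, n, m):
--     # split one factor (a, n) against m
--     d = math.gcd(a, m)
--     if d == 1:
--         return [(a, n)]
--     if a // d == 1:
--         return [(d, n)]
--     return [(a // d, n), (d, n)]
--
-- def add_factor(factor_list, new_factor):
--     # worklist: look only at the head; a head coprime to the rest is finished,
--     # otherwise split it against its first partner (no global pair rescans).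
--     work = [p for a in factor_list for p in _split_by(a[0], a[1], new_factor)]
--     done = []
--     while work:
--         (h, hn), rest = work[0], work[1:]
--         j = next((k for k, x in enumerate(rest) if math.gcd(h, x[0]) != 1), None)
--         if j is None:
--             done.append((h, hn))
--             work = rest
--         else:
--             b, bn = rest[j]
--             d = math.gcd(h, b)
--             pieces = [p for p in [(h // d, hn), (d, hn + bn), (b // d, bn)] if p[0] != 1]
--             work = rest[:j] + rest[j + 1:] + pieces
--     return sorted(done, key=lambda t: t[0])
-- ===== Notes on version B (the rewrite author's own statement) =====
-- stated objective: alternative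
-- what changed: A repeatedly rescans all index pairs of the whole list from scratch after every split and sorts the fully refined list at the end; B keeps a worklist and only ever examines its head, retiring it when it is coprime to the rest or splitting it against its first partner, then sorts the retired entries once.
-- outside the precondition, e.g. on add_factor([(0, 1)], 1): A returns [(0, 1)], B returns [(0, 1)]
import Mathlib
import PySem

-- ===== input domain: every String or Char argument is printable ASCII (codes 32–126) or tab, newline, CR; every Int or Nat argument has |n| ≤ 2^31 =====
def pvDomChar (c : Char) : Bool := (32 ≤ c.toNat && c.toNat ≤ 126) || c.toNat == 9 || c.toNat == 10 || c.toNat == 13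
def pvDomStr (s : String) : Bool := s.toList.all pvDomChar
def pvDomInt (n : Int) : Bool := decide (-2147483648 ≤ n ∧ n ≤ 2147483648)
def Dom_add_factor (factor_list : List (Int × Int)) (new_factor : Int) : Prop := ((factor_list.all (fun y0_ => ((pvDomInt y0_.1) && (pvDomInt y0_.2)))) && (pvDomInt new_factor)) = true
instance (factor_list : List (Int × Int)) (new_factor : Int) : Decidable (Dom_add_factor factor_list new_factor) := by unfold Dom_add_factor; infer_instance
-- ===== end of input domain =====

-- B replaces A's restart-from-scratch global pair scan by a head-focused worklist
-- (retire a head coprime to the rest, else split it against its first partner).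
-- Equality is about the return value; neither function mutates its arguments.

-- ===== PORT A =====

-- product of |base| over the list; used only to size the fuel of the while-loops
def pvMu (L : List (Int × Int)) : Nat := (L.map (fun p => p.1.natAbs)).prod

-- inner 'for j in range(i+1, len(L))' scan with break
def innerScanA (L : List (Int × Int)) (xi : Int) (i j : Nat) : Option (Nat × Nat) :=
  if _h : j < L.length then
    if Int.gcd xi (PySem.List.pyGetD L (j : Int) (0, 0)).1 ≠ 1 then some (i, j)
    else innerScanA L xi i (j + 1)
  else none
termination_by L.length - j

-- outer 'for i in range(len(L))' scan with break
def outerScanA (L : List (Int × Int)) (i : Nat) : Option (Nat × Nat) :=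
  if _h : i < L.length then
    match innerScanA L (PySem.List.pyGetD L (i : Int) (0, 0)).1 i (i + 1) with
    | some p => some p
    | none => outerScanA L (i + 1)
  else none
termination_by L.length - i

def findPairA (L : List (Int × Int)) : Option (Nat × Nat) := outerScanA L 0

-- the 'while True' loop of refine (fuel; never exhausted when all bases are nonzero)
def refineA : Nat → List (Int × Int) → List (Int × Int)
  | 0, L => PySem.List.sorted L (fun t => t.1) false
  | fuel + 1, L =>
    match findPairA L with
    | none => PySem.List.sorted L (fun t => t.1) false   -- L.sort(key=lambda x: x[0])
    | some (i, j) =>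
      let Li := PySem.List.pyGetD L (i : Int) (0, 0)
      let Lj := PySem.List.pyGetD L (j : Int) (0, 0)
      let d : Int := (Int.gcd Li.1 Lj.1 : Int)
      let new1 := (PySem.Int.floordiv Li.1 d, Li.2)
      let new2 := (d, Li.2 + Lj.2)
      let new3 := (PySem.Int.floordiv Lj.1 d, Lj.2)
      -- del L[j]; del L[i]  (j > i), exact for in-range indices
      let L1 := (L.eraseIdx j).eraseIdx i
      -- for newer in new_guys: if newer[0] != 1: L.append(newer)
      let L2 := [new1, new2, new3].foldl (fun acc newer => if newer.1 ≠ 1 then acc ++ [newer] else acc) L1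
      refineA fuel L2

def add_factor (factor_list : List (Int × Int)) (new_factor : Int) : List (Int × Int) :=
  let new_list := factor_list.foldl (fun nl a =>
    let d : Int := (Int.gcd a.1 new_factor : Int)
    if d = 1 then nl ++ [a]
    else if PySem.Int.floordiv a.1 d = 1 then nl ++ [(d, a.2)]
    else nl ++ [(PySem.Int.floordiv a.1 d, a.2), (d, a.2)]) []
  refineA (pvMu new_list + 1) new_list

-- ===== PORT B =====

def splitBy (a n m : Int) : List (Int × Int) :=
  let d : Int := (Int.gcd a m : Int)
  if d = 1 then [(a, n)]
  else if PySem.Int.floordiv a d = 1 then [(d, n)]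
  else [(PySem.Int.floordiv a d, n), (d, n)]

-- the 'while work' loop (fuel; never exhausted when all bases are nonzero)
def refineB : Nat → List (Int × Int) → List (Int × Int) → List (Int × Int)
  | 0, _, done => PySem.List.sorted done (fun t => t.1) false
  | fuel + 1, work, done =>
    match work with
    | [] => PySem.List.sorted done (fun t => t.1) false  -- sorted(done, key=lambda t: t[0])
    | h :: rest =>
      match rest.findIdx? (fun x => Int.gcd h.1 x.1 != 1) with
      | none => refineB fuel rest (done ++ [h])
      | some j =>
        let x := PySem.List.pyGetD rest (j : Int) (0, 0)
        let d : Int := (Int.gcd h.1 x.1 : Int)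
        let pieces := [(PySem.Int.floordiv h.1 d, h.2), (d, h.2 + x.2),
                       (PySem.Int.floordiv x.1 d, x.2)].filter (fun p => p.1 ≠ 1)
        refineB fuel (PySem.List.slice rest none (some (j : Int)) ++
                      PySem.List.slice rest (some ((j : Int) + 1)) none ++ pieces) done

def add_factor_alt (factor_list : List (Int × Int)) (new_factor : Int) : List (Int × Int) :=
  let work := factor_list.flatMap (fun a => splitBy a.1 a.2 new_factor)
  refineB (2 * pvMu work + work.length + 1) work []

-- ===== PRECONDITION & SPEC =====
-- Pre_ excludes lists containing a base 0: there A's refine loop in general never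
-- terminates (or raises ZeroDivisionError on gcd 0), and B behaves the same way;
-- A returns only in degenerate cases where the 0 never meets a non-coprime partner.
def Pre_add_factor (factor_list : List (Int × Int)) (new_factor : Int) : Prop :=
  ∀ p ∈ factor_list, p.1 ≠ 0
instance (factor_list : List (Int × Int)) (new_factor : Int) : Decidable (Pre_add_factor factor_list new_factor) := by unfold Pre_add_factor; infer_instance

def pvWitness_add_factor : (List (Int × Int)) × Int := ([(6, 1), (4, 2)], 2)

def Spec_add_factor (factor_list : List (Int × Int)) (new_factor : Int) (out : List (Int × Int)) : Prop := out = add_factor_alt factor_list new_factor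
instance (factor_list : List (Int × Int)) (new_factor : Int) (out : List (Int × Int)) : Decidable (Spec_add_factor factor_list new_factor out) := by unfold Spec_add_factor; infer_instance

-- ===== CLAIM (what is proved, stated in full; the proofs are below) =====
def Claim_equal_add_factor : Prop := ∀ (factor_list : List (Int × Int)) (new_factor : Int), Dom_add_factor factor_list new_factor → Pre_add_factor factor_list new_factor → Spec_add_factor factor_list new_factor (add_factor factor_list new_factor)


-- ===== LEMMAS AND PROOFS =====

-- abstract first-clash search (proof-only reformulation of A's nested scans)
def firstPair (L : List (Int × Int)) : Option (Nat × Nat) :=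
  match L with
  | [] => none
  | x :: xs =>
    match xs.findIdx? (fun y => Int.gcd x.1 y.1 != 1) with
    | some j => some (0, j + 1)
    | none => (firstPair xs).map (fun p => (p.1 + 1, p.2 + 1))

def NZ (L : List (Int × Int)) : Prop := ∀ p ∈ L, p.1 ≠ 0
def Inert (done work : List (Int × Int)) : Prop := ∀ a ∈ done, ∀ b ∈ work, Int.gcd a.1 b.1 = 1
def PC (L : List (Int × Int)) : Prop := L.Pairwise (fun a b => Int.gcd a.1 b.1 = 1)

theorem pyGetD_in_range (L : List (Int × Int)) (j : Nat) (h : j < L.length) :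
    PySem.List.pyGetD L (j : Int) (0, 0) = L[j] := by
  rw [PySem.List.pyGetD_natCast]
  exact List.getD_eq_getElem L (0,0) h

theorem inner_spec (L : List (Int × Int)) (xi : Int) (i j : Nat) :
    innerScanA L xi i j =
      ((L.drop j).findIdx? (fun y => Int.gcd xi y.1 != 1)).map (fun k => (i, j + k)) := by
  by_cases h : j < L.length
  · rw [innerScanA, dif_pos h, pyGetD_in_range L j h,
        List.drop_eq_getElem_cons h, List.findIdx?_cons]
    by_cases hg : Int.gcd xi (L[j]).1 ≠ 1
    · simp [hg]
    · rw [if_neg hg, inner_spec L xi i (j+1)]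
      simp at hg
      simp [hg, Option.map_map]
      apply congrFun; apply congrArg; funext k; simp; omega
  · rw [innerScanA, dif_neg h]
    rw [List.drop_eq_nil_of_le (by omega)]
    simp
termination_by L.length - j

theorem outer_spec (L : List (Int × Int)) (i : Nat) :
    outerScanA L i = (firstPair (L.drop i)).map (fun p => (i + p.1, i + p.2)) := by
  by_cases h : i < L.length
  · rw [outerScanA, dif_pos h, pyGetD_in_range L i h, inner_spec,
        List.drop_eq_getElem_cons h, firstPair]
    cases hf : (L.drop (i+1)).findIdx? (fun y => Int.gcd (L[i]).1 y.1 != 1) with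
    | some k => simp; omega
    | none =>
      simp only [Option.map_none]
      rw [outer_spec L (i+1)]
      cases firstPair (L.drop (i+1)) with
      | none => simp
      | some p => simp; omega
  · rw [outerScanA, dif_neg h, List.drop_eq_nil_of_le (by omega)]
    simp [firstPair]
termination_by L.length - i

theorem findPairA_eq_firstPair (L : List (Int × Int)) : findPairA L = firstPair L := by
  rw [findPairA, outer_spec]
  simp only [List.drop_zero, Nat.zero_add]
  cases firstPair L <;> simp

theorem firstPair_append_skip (done M : List (Int × Int)) (hpc : PC done) (hin : Inert done M) :
    firstPair (done ++ M) = (firstPair M).map (fun p => (done.length + p.1, done.length + p.2)) := by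
  induction done with
  | nil =>
    simp only [List.nil_append, List.length_nil, Nat.zero_add]
    cases firstPair M <;> simp
  | cons d rest ih =>
    have hpc' : PC rest := (List.pairwise_cons.mp hpc).2
    have hdrest : ∀ y ∈ rest, Int.gcd d.1 y.1 = 1 := (List.pairwise_cons.mp hpc).1
    have hin' : Inert rest M := fun a ha => hin a (List.mem_cons_of_mem d ha)
    have hnone : (rest ++ M).findIdx? (fun y => Int.gcd d.1 y.1 != 1) = none := by
      rw [List.findIdx?_eq_none_iff]
      intro y hy
      rcases List.mem_append.mp hy with h | h
      · simp [hdrest y h]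
      · simp [hin d (by simp) y h]
    rw [List.cons_append, firstPair]
    simp only [hnone, ih hpc' hin']
    cases firstPair M
    · simp
    · simp; omega

theorem pvMu_append (a b : List (Int × Int)) : pvMu (a ++ b) = pvMu a * pvMu b := by
  simp [pvMu]

theorem pvMu_cons (a : Int × Int) (l : List (Int × Int)) :
    pvMu (a :: l) = a.1.natAbs * pvMu l := by
  simp [pvMu]

theorem pvMu_pos (L : List (Int × Int)) (h : NZ L) : 1 ≤ pvMu L := by
  induction L with
  | nil => simp [pvMu]
  | cons a l ih =>
    have ha := h a (by simp)
    have h1 : 1 ≤ a.1.natAbs := by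
      rcases Nat.eq_zero_or_pos a.1.natAbs with h0 | h0
      · exact absurd (Int.natAbs_eq_zero.mp h0) ha
      · exact h0
    have h2 := ih (fun p hp => h p (List.mem_cons_of_mem a hp))
    calc 1 = 1 * 1 := by ring
    _ ≤ a.1.natAbs * pvMu l := Nat.mul_le_mul h1 h2
    _ = pvMu (a :: l) := by simp [pvMu]

theorem pvMu_eraseIdx (L : List (Int × Int)) (j : Nat) (hj : j < L.length) :
    pvMu L = L[j].1.natAbs * pvMu (L.eraseIdx j) := by
  induction L generalizing j with
  | nil => simp at hj
  | cons a l ih =>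
    cases j with
    | zero => simp [pvMu]
    | succ k =>
      simp only [List.eraseIdx_cons_succ, List.getElem_cons_succ]
      have := ih k (by simpa using hj)
      simp [pvMu, List.map_cons, List.prod_cons] at this ⊢
      rw [this]; ring

theorem eraseIdx_append_right (l1 l2 : List (Int × Int)) (k : Nat) :
    (l1 ++ l2).eraseIdx (l1.length + k) = l1 ++ l2.eraseIdx k := by
  induction l1 with
  | nil => simp
  | cons a l ih => simpa [Nat.succ_add] using ih

theorem coprime_of_dvd_right (a b c : Int) (h : Int.gcd a b = 1) (hd : c ∣ b) :
    Int.gcd a c = 1 := by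
  have : c.natAbs ∣ b.natAbs := Int.natAbs_dvd_natAbs.mpr hd
  exact Nat.Coprime.coprime_dvd_right this h

theorem pvMu_filter_ne_one (l : List (Int × Int)) :
    pvMu (l.filter (fun p => p.1 ≠ 1)) = pvMu l := by
  induction l with
  | nil => rfl
  | cons a l ih =>
    rw [List.filter_cons]
    by_cases h : a.1 = 1
    · rw [if_neg (by simp [h]), ih, pvMu_cons, h]
      simp
    · rw [if_pos (by simp [h]), pvMu_cons, pvMu_cons, ih]

theorem ediv_ne_zero_of_dvd (a b : Int) (hd : b ∣ a) (ha : a ≠ 0) : a / b ≠ 0 := by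
  intro hz
  have hc : a = b * (a / b) := (Int.mul_ediv_cancel' hd).symm
  rw [hz, mul_zero] at hc
  exact ha hc

theorem ediv_dvd_self (a b : Int) (hd : b ∣ a) : a / b ∣ a :=
  ⟨b, (Int.ediv_mul_cancel hd).symm⟩

theorem main_lemma (n : Nat) : ∀ (work done : List (Int × Int)) (fa fb : Nat),
    2 * (pvMu done * pvMu work) + work.length ≤ n →
    NZ work → NZ done → PC done → Inert done work →
    pvMu done * pvMu work + 1 ≤ fa →
    2 * (pvMu done * pvMu work) + work.length + 1 ≤ fb →
    refineA fa (done ++ work) = refineB fb work done := by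
  induction n using Nat.strong_induction_on with
  | _ n ih =>
  intro work done fa fb hn hNZw hNZd hPC hIn hfa hfb
  have hpd : 1 ≤ pvMu done := pvMu_pos done hNZd
  obtain ⟨fa', rfl⟩ : ∃ fa', fa = fa' + 1 := ⟨fa - 1, by omega⟩
  obtain ⟨fb', rfl⟩ : ∃ fb', fb = fb' + 1 := ⟨fb - 1, by omega⟩
  cases work with
  | nil =>
    have hfp : findPairA (done ++ ([] : List (Int × Int))) = none := by
      rw [findPairA_eq_firstPair,
          firstPair_append_skip done [] hPC (fun a _ b hb => absurd hb (List.not_mem_nil))]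
      simp [firstPair]
    rw [refineA, refineB, hfp]
    rw [List.append_nil]
  | cons h rest =>
    cases hidx : rest.findIdx? (fun y => Int.gcd h.1 y.1 != 1) with
    | none =>
      -- the head is coprime to everything after it: A never touches it again, B retires it
      have hco : ∀ y ∈ rest, Int.gcd h.1 y.1 = 1 := by
        intro y hy
        have := List.findIdx?_eq_none_iff.mp hidx y hy
        simpa using this
      have hPC' : PC (done ++ [h]) := by
        unfold PC at hPC ⊢
        rw [List.pairwise_append]
        refine ⟨hPC, List.pairwise_singleton _ _, fun a ha b hb => ?_⟩
        simp at hb; rw [hb]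
        exact hIn a ha h (by simp)
      have hIn' : Inert (done ++ [h]) rest := by
        intro a ha b hb
        rcases List.mem_append.mp ha with h' | h'
        · exact hIn a h' b (List.mem_cons_of_mem h hb)
        · simp at h'; rw [h']; exact hco b hb
      have hNZ' : NZ rest := fun p hp => hNZw p (List.mem_cons_of_mem h hp)
      have hNZd' : NZ (done ++ [h]) := by
        intro p hp
        rcases List.mem_append.mp hp with h' | h'
        · exact hNZd p h'
        · simp at h'; rw [h']; exact hNZw h (by simp)
      have hmu : pvMu (done ++ [h]) * pvMu rest = pvMu done * pvMu (h :: rest) := by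
        rw [pvMu_append, pvMu_cons]; simp [pvMu]; ring
      have hlen : (h :: rest).length = rest.length + 1 := rfl
      have hres := ih (2 * (pvMu (done ++ [h]) * pvMu rest) + rest.length)
        (by rw [hmu]; rw [hlen] at hn; omega)
        rest (done ++ [h]) (fa' + 1) fb'
        (le_refl _) hNZ' hNZd' hPC' hIn'
        (by rw [hmu]; exact hfa)
        (by rw [hmu]; rw [hlen] at hfb; omega)
      calc refineA (fa' + 1) (done ++ h :: rest)
          = refineA (fa' + 1) ((done ++ [h]) ++ rest) := by rw [List.append_assoc]; rfl
        _ = refineB fb' rest (done ++ [h]) := hres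
        _ = refineB (fb' + 1) (h :: rest) done := by rw [refineB, hidx]
    | some j =>
      obtain ⟨hjlen, hPj, -⟩ := List.findIdx?_eq_some_iff_getElem.mp hidx
      have hgne : Int.gcd h.1 (rest[j]).1 ≠ 1 := by simpa using hPj
      have hxmem : rest[j] ∈ rest := List.getElem_mem hjlen
      have hh0 : h.1 ≠ 0 := hNZw h (by simp)
      have hx0 : (rest[j]).1 ≠ 0 := hNZw _ (List.mem_cons_of_mem h hxmem)
      have hD0 : Int.gcd h.1 (rest[j]).1 ≠ 0 := fun hc => hh0 (Int.gcd_eq_zero_iff.mp hc).1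
      have hD2 : 2 ≤ Int.gcd h.1 (rest[j]).1 := by omega
      have hDpos : (0 : Int) < ((Int.gcd h.1 (rest[j]).1 : Nat) : Int) := by
        exact_mod_cast Nat.pos_of_ne_zero hD0
      have hdh : ((Int.gcd h.1 (rest[j]).1 : Nat) : Int) ∣ h.1 := Int.gcd_dvd_left _ _
      have hdx : ((Int.gcd h.1 (rest[j]).1 : Nat) : Int) ∣ (rest[j]).1 := Int.gcd_dvd_right _ _
      have hcast : ((j : Int) + 1) = ((j + 1 : Nat) : Int) := by push_cast; ring
      have hB : refineB (fb' + 1) (h :: rest) done =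
          refineB fb' (rest.eraseIdx j ++
            ([(PySem.Int.floordiv h.1 ((Int.gcd h.1 (rest[j]).1 : Nat) : Int), h.2),
              (((Int.gcd h.1 (rest[j]).1 : Nat) : Int), h.2 + (rest[j]).2),
              (PySem.Int.floordiv (rest[j]).1 ((Int.gcd h.1 (rest[j]).1 : Nat) : Int), (rest[j]).2)].filter
                (fun p => p.1 ≠ 1))) done := by
        simp only [refineB, hidx, pyGetD_in_range rest j hjlen, hcast,
            PySem.List.slice_to_natCast, PySem.List.slice_from_natCast]
        rw [← List.eraseIdx_eq_take_drop_succ]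
      have hfp : findPairA (done ++ h :: rest) = some (done.length, done.length + (j + 1)) := by
        rw [findPairA_eq_firstPair, firstPair_append_skip done _ hPC hIn]
        simp only [firstPair, hidx]
        simp
      have hLi : PySem.List.pyGetD (done ++ h :: rest) ((done.length : Nat) : Int) (0, 0) = h := by
        rw [pyGetD_in_range _ _ (by simp)]
        rw [List.getElem_append_right (le_refl _)]
        simp
      have hLj : PySem.List.pyGetD (done ++ h :: rest) ((done.length + (j + 1) : Nat) : Int) (0, 0) = rest[j] := by
        rw [pyGetD_in_range _ _ (by simp; omega)]
        rw [List.getElem_append_right (by omega)]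
        simp
      have hE1 : (done ++ h :: rest).eraseIdx (done.length + (j + 1)) = done ++ h :: rest.eraseIdx j := by
        rw [eraseIdx_append_right]
        rw [List.eraseIdx_cons_succ]
      have hE2 : (done ++ h :: rest.eraseIdx j).eraseIdx done.length = done ++ rest.eraseIdx j := by
        have := eraseIdx_append_right done (h :: rest.eraseIdx j) 0
        simpa using this
      have hA : refineA (fa' + 1) (done ++ h :: rest) =
          refineA fa' ((done ++ rest.eraseIdx j) ++
            ([(PySem.Int.floordiv h.1 ((Int.gcd h.1 (rest[j]).1 : Nat) : Int), h.2),
              (((Int.gcd h.1 (rest[j]).1 : Nat) : Int), h.2 + (rest[j]).2),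
              (PySem.Int.floordiv (rest[j]).1 ((Int.gcd h.1 (rest[j]).1 : Nat) : Int), (rest[j]).2)].filter
                (fun p => p.1 ≠ 1))) := by
        simp only [refineA, hfp, hLi, hLj, hE1, hE2]
        rw [PySem.List.foldl_append_ite_eq_filter]
      -- abbreviations
      set g : Int := ((Int.gcd h.1 (rest[j]).1 : Nat) : Int) with hg
      set P : List (Int × Int) :=
        [(PySem.Int.floordiv h.1 g, h.2), (g, h.2 + (rest[j]).2),
         (PySem.Int.floordiv (rest[j]).1 g, (rest[j]).2)].filter (fun p => p.1 ≠ 1) with hPdef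
      have hfdh : PySem.Int.floordiv h.1 g = h.1 / g := PySem.Int.floordiv_eq_ediv_of_pos hDpos
      have hfdx : PySem.Int.floordiv (rest[j]).1 g = (rest[j]).1 / g := PySem.Int.floordiv_eq_ediv_of_pos hDpos
      have hgabs : g.natAbs = Int.gcd h.1 (rest[j]).1 := Int.natAbs_natCast _
      have hNZ' : NZ rest := fun p hp => hNZw p (List.mem_cons_of_mem h hp)
      have hg0 : g ≠ 0 := by
        intro hc
        rw [hc] at hDpos
        exact lt_irrefl _ hDpos
      have hmemP : ∀ p ∈ P, p.1 ∣ h.1 ∧ p.1 ≠ 0 ∨ p.1 ∣ (rest[j]).1 ∧ p.1 ≠ 0 := by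
        intro p hp
        have hp' := (List.mem_filter.mp hp).1
        simp only [List.mem_cons, List.not_mem_nil, or_false] at hp'
        rcases hp' with hc | hc | hc
        · left
          rw [hc]
          simp only [hfdh]
          exact ⟨ediv_dvd_self h.1 g hdh, ediv_ne_zero_of_dvd h.1 g hdh hh0⟩
        · left
          rw [hc]
          exact ⟨hdh, hg0⟩
        · right
          rw [hc]
          simp only [hfdx]
          exact ⟨ediv_dvd_self _ g hdx, ediv_ne_zero_of_dvd _ g hdx hx0⟩
      have hNZW' : NZ (rest.eraseIdx j ++ P) := by
        intro p hp
        rcases List.mem_append.mp hp with hc | hc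
        · exact hNZ' p (List.mem_of_mem_eraseIdx hc)
        · rcases hmemP p hc with ⟨-, h0⟩ | ⟨-, h0⟩ <;> exact h0
      have hInW' : Inert done (rest.eraseIdx j ++ P) := by
        intro a ha b hb
        rcases List.mem_append.mp hb with hc | hc
        · exact hIn a ha b (List.mem_cons_of_mem h (List.mem_of_mem_eraseIdx hc))
        · rcases hmemP b hc with ⟨hdvd', -⟩ | ⟨hdvd', -⟩
          · exact coprime_of_dvd_right a.1 h.1 b.1 (hIn a ha h (by simp)) hdvd'
          · exact coprime_of_dvd_right a.1 (rest[j]).1 b.1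
              (hIn a ha (rest[j]) (List.mem_cons_of_mem h hxmem)) hdvd'
      -- the measure drops by the factor gcd ≥ 2
      obtain ⟨a1, ha1⟩ : Int.gcd h.1 (rest[j]).1 ∣ h.1.natAbs := by
        have := Int.natAbs_dvd_natAbs.mpr hdh
        rwa [hgabs] at this
      obtain ⟨a2, ha2⟩ : Int.gcd h.1 (rest[j]).1 ∣ (rest[j]).1.natAbs := by
        have := Int.natAbs_dvd_natAbs.mpr hdx
        rwa [hgabs] at this
      have hmuP : pvMu P = a1 * Int.gcd h.1 (rest[j]).1 * a2 := by
        rw [hPdef, pvMu_filter_ne_one]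
        simp only [pvMu, List.map_cons, List.map_nil, List.prod_cons, List.prod_nil, mul_one]
        rw [hfdh, hfdx, Int.natAbs_ediv_of_dvd hdh, Int.natAbs_ediv_of_dvd hdx, hgabs, ha1, ha2]
        rw [Nat.mul_div_cancel_left _ (by omega), Nat.mul_div_cancel_left _ (by omega)]
        ring
      have hmuw : pvMu (h :: rest) = Int.gcd h.1 (rest[j]).1 * pvMu (rest.eraseIdx j ++ P) := by
        rw [pvMu_cons, pvMu_eraseIdx rest j hjlen, pvMu_append, hmuP, ha1, ha2]
        ring
      have ha1pos : 1 ≤ a1 := by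
        rcases Nat.eq_zero_or_pos a1 with hz | hp'
        · rw [hz, mul_zero] at ha1
          exact absurd (Int.natAbs_eq_zero.mp ha1) hh0
        · exact hp'
      have hP1pos : 1 ≤ pvMu done * pvMu (rest.eraseIdx j ++ P) :=
        Nat.one_le_iff_ne_zero.mpr (Nat.mul_ne_zero (by omega)
          (Nat.one_le_iff_ne_zero.mp (pvMu_pos _ hNZW')))
      have hlenP : P.length ≤ 3 := by
        rw [hPdef]
        exact le_trans (List.length_filter_le _ _) (by simp)
      have hlenE : (rest.eraseIdx j).length = rest.length - 1 := by
        rw [List.length_eraseIdx]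
        simp [hjlen]
      have hrel : pvMu done * pvMu (h :: rest) =
          Int.gcd h.1 (rest[j]).1 * (pvMu done * pvMu (rest.eraseIdx j ++ P)) := by
        rw [hmuw]; ring
      have h2P : 2 * (pvMu done * pvMu (rest.eraseIdx j ++ P)) ≤
          Int.gcd h.1 (rest[j]).1 * (pvMu done * pvMu (rest.eraseIdx j ++ P)) :=
        Nat.mul_le_mul_right _ hD2
      have hlenW' : (rest.eraseIdx j ++ P).length ≤ rest.length + 2 := by
        rw [List.length_append, hlenE]
        omega
      have hlenwork : (h :: rest).length = rest.length + 1 := rfl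
      have hres := ih (2 * (pvMu done * pvMu (rest.eraseIdx j ++ P)) + (rest.eraseIdx j ++ P).length)
        (by rw [hlenwork] at hn; rw [hrel] at hn; omega)
        (rest.eraseIdx j ++ P) done fa' fb'
        (le_refl _) hNZW' hNZd hPC hInW'
        (by rw [hrel] at hfa; omega)
        (by rw [hlenwork] at hfb; rw [hrel] at hfb; omega)
      rw [hA, hB, List.append_assoc]
      exact hres

theorem addpass_eq (fl : List (Int × Int)) (nf : Int) :
    fl.foldl (fun nl a =>
      let d : Int := (Int.gcd a.1 nf : Int)
      if d = 1 then nl ++ [a]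
      else if PySem.Int.floordiv a.1 d = 1 then nl ++ [(d, a.2)]
      else nl ++ [(PySem.Int.floordiv a.1 d, a.2), (d, a.2)]) [] =
    fl.flatMap (fun a => splitBy a.1 a.2 nf) := by
  have gen : ∀ (l : List (Int × Int)) (acc : List (Int × Int)),
      l.foldl (fun nl a =>
        let d : Int := (Int.gcd a.1 nf : Int)
        if d = 1 then nl ++ [a]
        else if PySem.Int.floordiv a.1 d = 1 then nl ++ [(d, a.2)]
        else nl ++ [(PySem.Int.floordiv a.1 d, a.2), (d, a.2)]) acc =
      acc ++ l.flatMap (fun a => splitBy a.1 a.2 nf) := by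
    intro l
    induction l with
    | nil => simp
    | cons a l ih =>
      intro acc
      simp only [List.foldl_cons, List.flatMap_cons, ih, splitBy]
      split_ifs <;> simp
  simpa using gen fl []

theorem NZ_splitBy (a n nf : Int) (ha : a ≠ 0) : NZ (splitBy a n nf) := by
  unfold NZ
  simp only [splitBy]
  have hdvd : ((Int.gcd a nf : Nat) : Int) ∣ a := Int.gcd_dvd_left a nf
  have hg0 : Int.gcd a nf ≠ 0 := fun h => ha (Int.gcd_eq_zero_iff.mp h).1
  split_ifs with h1 h2
  · intro p hp; simp at hp; subst hp; exact ha
  · intro p hp; simp at hp; subst hp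
    simp; omega
  · intro p hp
    rcases List.mem_cons.mp hp with h | h
    · subst h
      have hdpos : (0 : Int) < ((Int.gcd a nf : Nat) : Int) := by
        exact_mod_cast Nat.pos_of_ne_zero hg0
      rw [PySem.Int.floordiv_eq_ediv_of_pos hdpos]
      simp only [ne_eq]
      intro hz
      have hc : a = ((Int.gcd a nf : Nat) : Int) * (a / ((Int.gcd a nf : Nat) : Int)) :=
        (Int.mul_ediv_cancel' hdvd).symm
      rw [hz, mul_zero] at hc
      exact ha hc
    · simp at h; subst h; simp; omega

-- ===== VERDICT (by name: the statement is the Claim_ definition above) =====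
theorem add_factor_spec : Claim_equal_add_factor := by
  intro fl nf _hdom hpre
  unfold Spec_add_factor add_factor add_factor_alt
  simp only [addpass_eq]
  have hnz : NZ (fl.flatMap (fun a => splitBy a.1 a.2 nf)) := by
    intro p hp
    rcases List.mem_flatMap.mp hp with ⟨a, ha, hpa⟩
    exact NZ_splitBy a.1 a.2 nf (hpre a ha) p hpa
  have h := main_lemma (2 * pvMu (fl.flatMap (fun a => splitBy a.1 a.2 nf)) + (fl.flatMap (fun a => splitBy a.1 a.2 nf)).length)
    (fl.flatMap (fun a => splitBy a.1 a.2 nf)) [] (pvMu (fl.flatMap (fun a => splitBy a.1 a.2 nf)) + 1)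
    (2 * pvMu (fl.flatMap (fun a => splitBy a.1 a.2 nf)) + (fl.flatMap (fun a => splitBy a.1 a.2 nf)).length + 1)
    (by simp [pvMu]) hnz (by intro p hp; simp at hp) List.Pairwise.nil
    (by intro a ha; simp at ha) (by simp [pvMu]) (by simp [pvMu])
  simpa using h
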